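-- pv_equiv track=rewrite | github.com/2026-pwr-sl/team-yuri-python | src/LogReaderLAB6.py | ip_find
-- ===== SOURCE A (Python) =====
-- def ip_find(data, most_active=True):
--     count = {}
--     for ip in data:
--         count[ip] = len(data[ip])
--
--     if most_active:
--         value = max(count.values())
--     if not most_active:
--         value = min(count.values())
--
--     result = []
--     for ip in count:
--         if count[ip] == value:
--             result.append(ip)
--     return result
-- ===== SOURCE B (Python) =====
-- def ip_find(data, most_active=True):
--     best = None
--     result = []
--     for ip in data:
--         c = len(data[ip])
--         if best is None or (c > best if most_active else c < best):
--             best = c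
--             result = [ip]
--         elif c == best:
--             result.append(ip)
--     return result
-- ===== Notes on version B (the rewrite author's own statement) =====
-- stated objective: simpler
-- what changed: B replaces A's count dict, max/min over its values and second filtering scan by a single running-best pass that keeps the current extreme count and the list of IPs attaining it.
import Mathlib
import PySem

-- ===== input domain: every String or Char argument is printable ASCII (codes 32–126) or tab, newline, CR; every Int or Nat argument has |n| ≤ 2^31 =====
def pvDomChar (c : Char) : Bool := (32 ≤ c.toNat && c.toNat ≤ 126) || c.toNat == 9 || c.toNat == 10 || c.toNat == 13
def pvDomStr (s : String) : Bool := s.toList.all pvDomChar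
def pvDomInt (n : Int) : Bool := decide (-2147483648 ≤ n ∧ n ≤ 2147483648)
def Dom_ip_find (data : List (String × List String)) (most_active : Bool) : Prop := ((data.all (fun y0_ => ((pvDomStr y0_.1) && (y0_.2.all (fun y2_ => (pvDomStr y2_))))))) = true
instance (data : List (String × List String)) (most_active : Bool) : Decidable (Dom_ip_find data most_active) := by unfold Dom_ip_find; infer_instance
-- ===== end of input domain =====

-- B replaces A's count dict + max/min + second filtering scan by one running-best pass; simpler, single scan.

-- ===== PORT A =====
-- the Python parameter 'data' is a dict; the association list is decoded into it first
def ip_find (data : List (String × List String)) (most_active : Bool) : List String :=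
  let d : PySem.Dict String (List String) := PySem.Dict.ofList data
  -- count = {}; for ip in data: count[ip] = len(data[ip])
  let count : PySem.Dict String Int :=
    d.items.foldl (fun c kv => c.insert kv.1 (kv.2.length : Int)) PySem.Dict.empty
  -- value = max(count.values()) / min(count.values()); none = ValueError, excluded by Pre_
  match (if most_active then PySem.List.max? count.values (fun v => v)
         else PySem.List.min? count.values (fun v => v)) with
  | none => []
  | some value =>
    -- result = []; for ip in count: if count[ip] == value: result.append(ip)
    count.keys.foldl (fun r ip => if count.getD ip 0 == value then r ++ [ip] else r) []

-- ===== PORT B =====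
-- the running-best loop of Source B: carries (best : Option Int, result) through one pass
def ipFindGo (most_active : Bool) : List (String × List String) → Option Int → List String → List String
  | [], _, res => res
  | kv :: t, best, res =>
    let c : Int := kv.2.length
    match best with
    | none => ipFindGo most_active t (some c) [kv.1]
    | some b =>
      if (if most_active then b < c else c < b) then ipFindGo most_active t (some c) [kv.1]
      else if c == b then ipFindGo most_active t (some b) (res ++ [kv.1])
      else ipFindGo most_active t (some b) res

def ip_find_alt (data : List (String × List String)) (most_active : Bool) : List String :=
  ipFindGo most_active (PySem.Dict.ofList data).items none []

-- ===== PRECONDITION & SPEC =====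
-- Pre_ excludes only empty data, on which Python's max()/min() in A raises ValueError.
def Pre_ip_find (data : List (String × List String)) (most_active : Bool) : Prop := data ≠ []
instance (data : List (String × List String)) (most_active : Bool) : Decidable (Pre_ip_find data most_active) := by unfold Pre_ip_find; infer_instance
def pvWitness_ip_find : (List (String × List String)) × Bool := ([("a", ["1", "2"]), ("b", ["3"])], true)
def Spec_ip_find (data : List (String × List String)) (most_active : Bool) (out : List String) : Prop := out = ip_find_alt data most_active
instance (data : List (String × List String)) (most_active : Bool) (out : List String) : Decidable (Spec_ip_find data most_active out) := by unfold Spec_ip_find; infer_instance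

-- ===== CLAIM (what is proved, stated in full; the proofs are below) =====
def Claim_equal_ip_find : Prop := ∀ (data : List (String × List String)) (most_active : Bool), Dom_ip_find data most_active → Pre_ip_find data most_active → Spec_ip_find data most_active (ip_find data most_active)

-- ===== LEMMAS AND PROOFS =====

-- running max / min over the entry lengths, as the fold the invariant talks about
def pvFmax (b : Int) (t : List (String × List String)) : Int :=
  t.foldl (fun a kv => max a (kv.2.length : Int)) b
def pvFmin (b : Int) (t : List (String × List String)) : Int :=
  t.foldl (fun a kv => min a (kv.2.length : Int)) b

theorem le_pvFmax (b : Int) (t : List (String × List String)) : b ≤ pvFmax b t := by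
  induction t generalizing b with
  | nil => simp [pvFmax]
  | cons kv t ih =>
    exact le_trans (le_max_left b (kv.2.length : Int)) (ih (max b (kv.2.length : Int)))

theorem pvFmin_le (b : Int) (t : List (String × List String)) : pvFmin b t ≤ b := by
  induction t generalizing b with
  | nil => simp [pvFmin]
  | cons kv t ih =>
    exact le_trans (ih (min b (kv.2.length : Int))) (min_le_left b (kv.2.length : Int))

-- the loop invariant: from state (some b, res), the pass returns res (kept iff b stays extreme)
-- followed by the keys of the remaining items whose count equals the overall extreme
theorem go_some_max (t : List (String × List String)) (b : Int) (res : List String) :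
    ipFindGo true t (some b) res =
      (if pvFmax b t = b then res else [])
        ++ (t.filter (fun kv => (kv.2.length : Int) == pvFmax b t)).map Prod.fst := by
  induction t generalizing b res with
  | nil => simp [ipFindGo, pvFmax]
  | cons kv t ih =>
    have hM : pvFmax b (kv :: t) = pvFmax (max b (kv.2.length : Int)) t := by
      simp [pvFmax]
    by_cases hbc : b < (kv.2.length : Int)
    · have hmax : max b (kv.2.length : Int) = (kv.2.length : Int) := max_eq_right (le_of_lt hbc)
      have hc_le : (kv.2.length : Int) ≤ pvFmax (kv.2.length : Int) t := le_pvFmax _ t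
      have hMb : pvFmax b (kv :: t) ≠ b := by rw [hM, hmax]; omega
      rw [show ipFindGo true (kv :: t) (some b) res
            = ipFindGo true t (some (kv.2.length : Int)) [kv.1] from by
        simp only [ipFindGo]; rw [if_pos]; simpa using hbc]
      rw [ih, hM, hmax]
      have hcb : ¬ ((kv.2.length : Int) = b) := by omega
      have hFb : ¬ (pvFmax (kv.2.length : Int) t = b) := by omega
      simp only [List.filter_cons, List.map_cons]
      by_cases hcm : pvFmax (kv.2.length : Int) t = (kv.2.length : Int)
      · simp [hcm, hcb]
      · have hne : ¬ ((kv.2.length : Int) = pvFmax (kv.2.length : Int) t) :=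
          fun h => hcm h.symm
        simp [beq_iff_eq, hcm, hne, hFb]
    · by_cases heq : (kv.2.length : Int) = b
      · have hmax : max b (kv.2.length : Int) = b := by omega
        rw [show ipFindGo true (kv :: t) (some b) res
              = ipFindGo true t (some b) (res ++ [kv.1]) from by
          simp only [ipFindGo]
          rw [if_neg (by simpa using hbc), if_pos (beq_iff_eq.mpr heq)], ih]
        rw [hM, hmax]
        simp only [List.filter_cons, heq, List.map_cons]
        by_cases hfb : pvFmax b t = b
        · simp [hfb, List.append_assoc]
        · have : ¬ ((b : Int) == pvFmax b t) = true := by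
            simp [beq_iff_eq]; intro h; exact hfb h.symm
          simp [hfb, this]
      · have hlt : (kv.2.length : Int) < b := by omega
        have hmax : max b (kv.2.length : Int) = b := max_eq_left (le_of_lt hlt)
        rw [show ipFindGo true (kv :: t) (some b) res
              = ipFindGo true t (some b) res from by
          simp only [ipFindGo]
          rw [if_neg (by simpa using hbc), if_neg (by simp [beq_iff_eq]; omega)], ih]
        rw [hM, hmax]
        have hble : b ≤ pvFmax b t := le_pvFmax b t
        have : ¬ (((kv.2.length : Int)) == pvFmax b t) = true := by
          simp [beq_iff_eq]; omega
        simp only [List.filter_cons, this, if_neg]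
        simp [this]

theorem go_some_min (t : List (String × List String)) (b : Int) (res : List String) :
    ipFindGo false t (some b) res =
      (if pvFmin b t = b then res else [])
        ++ (t.filter (fun kv => (kv.2.length : Int) == pvFmin b t)).map Prod.fst := by
  induction t generalizing b res with
  | nil => simp [ipFindGo, pvFmin]
  | cons kv t ih =>
    have hM : pvFmin b (kv :: t) = pvFmin (min b (kv.2.length : Int)) t := by
      simp [pvFmin]
    by_cases hbc : (kv.2.length : Int) < b
    · have hmin : min b (kv.2.length : Int) = (kv.2.length : Int) := min_eq_right (le_of_lt hbc)
      have hc_ge : pvFmin (kv.2.length : Int) t ≤ (kv.2.length : Int) := pvFmin_le _ t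
      have hMb : pvFmin b (kv :: t) ≠ b := by rw [hM, hmin]; omega
      rw [show ipFindGo false (kv :: t) (some b) res
            = ipFindGo false t (some (kv.2.length : Int)) [kv.1] from by
        simp only [ipFindGo]; rw [if_pos]; simpa using hbc]
      rw [ih, hM, hmin]
      have hcb : ¬ ((kv.2.length : Int) = b) := by omega
      have hFb : ¬ (pvFmin (kv.2.length : Int) t = b) := by omega
      simp only [List.filter_cons, List.map_cons]
      by_cases hcm : pvFmin (kv.2.length : Int) t = (kv.2.length : Int)
      · simp [hcm, hcb]
      · have hne : ¬ ((kv.2.length : Int) = pvFmin (kv.2.length : Int) t) :=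
          fun h => hcm h.symm
        simp [beq_iff_eq, hcm, hne, hFb]
    · by_cases heq : (kv.2.length : Int) = b
      · have hmin : min b (kv.2.length : Int) = b := by omega
        rw [show ipFindGo false (kv :: t) (some b) res
              = ipFindGo false t (some b) (res ++ [kv.1]) from by
          simp only [ipFindGo]
          rw [if_neg (by simpa using hbc), if_pos (beq_iff_eq.mpr heq)], ih]
        rw [hM, hmin]
        simp only [List.filter_cons, heq, List.map_cons]
        by_cases hfb : pvFmin b t = b
        · simp [hfb, List.append_assoc]
        · have : ¬ ((b : Int) == pvFmin b t) = true := by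
            simp [beq_iff_eq]; intro h; exact hfb h.symm
          simp [hfb, this]
      · have hlt : b < (kv.2.length : Int) := by omega
        have hmin : min b (kv.2.length : Int) = b := min_eq_left (le_of_lt hlt)
        rw [show ipFindGo false (kv :: t) (some b) res
              = ipFindGo false t (some b) res from by
          simp only [ipFindGo]
          rw [if_neg (by simpa using hbc), if_neg (by simp [beq_iff_eq]; omega)], ih]
        rw [hM, hmin]
        have hble : pvFmin b t ≤ b := pvFmin_le b t
        have : ¬ (((kv.2.length : Int)) == pvFmin b t) = true := by
          simp [beq_iff_eq]; omega
        simp only [List.filter_cons, this, if_neg]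
        simp [this]

theorem ip_find_eq_alt (data : List (String × List String)) (most_active : Bool) :
    ip_find data most_active = ip_find_alt data most_active := by
  unfold ip_find ip_find_alt
  set d := PySem.Dict.ofList data with hd
  have hnd : d.keys.Nodup := PySem.Dict.nodup_keys_ofList data
  set count := d.items.foldl (fun c kv => c.insert kv.1 (kv.2.length : Int)) PySem.Dict.empty with hc
  -- A-side characterisation: count's items are d's items with the entry lists replaced by lengths
  have hci : count.items = d.items.map (fun kv => (kv.1, (kv.2.length : Int))) := by
    rw [hc]
    refine PySem.Dict.items_foldl_insert_fresh d.items (fun kv => kv.1)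
      (fun kv => (kv.2.length : Int)) PySem.Dict.empty ?_ ?_
    · intro a _
      simp [PySem.Dict.contains_empty]
    · simpa [PySem.Dict.keys] using hnd
  have hcv : count.values = d.items.map (fun kv => (kv.2.length : Int)) := by
    simp [PySem.Dict.values, hci, List.map_map, Function.comp]
  have hck : count.keys = d.items.map (fun kv => kv.1) := by
    simp [PySem.Dict.keys, hci, List.map_map, Function.comp]
  have hcknd : count.keys.Nodup := by
    rw [hck]
    simpa [PySem.Dict.keys] using hnd
  have hget : ∀ kv ∈ d.items, count.getD kv.1 0 = (kv.2.length : Int) := by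
    intro kv hkv
    refine PySem.Dict.getD_of_mem_items count ?_ hcknd 0
    rw [hci]
    exact List.mem_map_of_mem hkv
  -- A's filtering scan is a filter over d.items
  have hAfilter : ∀ value : Int,
      count.keys.foldl (fun r ip => if count.getD ip 0 == value then r ++ [ip] else r) []
        = (d.items.filter (fun kv => (kv.2.length : Int) == value)).map Prod.fst := by
    intro value
    rw [PySem.List.foldl_append_if_eq_filter (fun ip => count.getD ip 0 == value), List.nil_append]
    rw [hck, List.filter_map]
    congr 1
    apply List.filter_congr
    intro kv hkv
    simp [hget kv hkv]
  show (match (if most_active = true then PySem.List.max? count.values (fun v => v)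
        else PySem.List.min? count.values (fun v => v)) with
    | none => []
    | some value => count.keys.foldl (fun r ip => if count.getD ip 0 == value then r ++ [ip] else r) [])
    = ipFindGo most_active d.items none []
  cases hit : d.items with
  | nil =>
    rw [hit] at hcv
    have hvnil : count.values = [] := by simpa using hcv
    have hmaxn : PySem.List.max? count.values (fun v : Int => v) = none := by
      rw [PySem.List.max?_eq_none_iff]; exact hvnil
    have hminn : PySem.List.min? count.values (fun v : Int => v) = none := by
      rw [PySem.List.min?_eq_none_iff]; exact hvnil
    cases most_active
    · simp only [Bool.false_eq_true, if_false, hminn]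
      rfl
    · simp only [if_pos, hmaxn]
      rfl
  | cons kv t =>
    rw [hit] at hcv
    cases most_active with
    | true =>
      have hmax : PySem.List.max? count.values (fun v => v)
          = some (pvFmax (kv.2.length : Int) t) := by
        rw [hcv, List.map_cons, PySem.List.max?_id_cons, List.foldl_map]
        rfl
      simp only [if_pos, hmax]
      rw [hAfilter, hit]
      rw [show ipFindGo true (kv :: t) none [] = ipFindGo true t (some (kv.2.length : Int)) [kv.1] from by
        simp only [ipFindGo]]
      rw [go_some_max]
      simp only [List.filter_cons, List.map_cons]
      by_cases hfb : pvFmax (kv.2.length : Int) t = (kv.2.length : Int)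
      · simp [hfb]
      · have : ¬ (((kv.2.length : Int)) == pvFmax (kv.2.length : Int) t) = true := by
          simp [beq_iff_eq]; intro h; exact hfb h.symm
        simp [hfb, this]
    | false =>
      have hmin : PySem.List.min? count.values (fun v => v)
          = some (pvFmin (kv.2.length : Int) t) := by
        rw [hcv, List.map_cons, PySem.List.min?_id_cons, List.foldl_map]
        rfl
      simp only [Bool.false_eq_true, if_false, hmin]
      rw [hAfilter, hit]
      rw [show ipFindGo false (kv :: t) none [] = ipFindGo false t (some (kv.2.length : Int)) [kv.1] from by
        simp only [ipFindGo]]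
      rw [go_some_min]
      simp only [List.filter_cons, List.map_cons]
      by_cases hfb : pvFmin (kv.2.length : Int) t = (kv.2.length : Int)
      · simp [hfb]
      · have : ¬ (((kv.2.length : Int)) == pvFmin (kv.2.length : Int) t) = true := by
          simp [beq_iff_eq]; intro h; exact hfb h.symm
        simp [hfb, this]

-- ===== VERDICT (by name: the statement is the Claim_ definition above) =====
theorem ip_find_spec : Claim_equal_ip_find := by
  intro data most_active _ _
  exact (ip_find_eq_alt data most_active)
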